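-- pv_equiv track=rewrite | github.com/ReganBell/queens | smartcuts.py | attackable
-- ===== SOURCE A (Python) =====
-- def attackable(q_x, q_y, x, y, N):
--     if q_x == x:
--         return True
--     if q_y == y:
--         return True
--     for k in range(-N, N):
--         if x+k == q_x and y+k == q_y:
--             return True
--         if x-k == q_x and y+k == q_y:
--             return True
--     return False
-- ===== SOURCE B (Python) =====
-- def attackable(q_x, q_y, x, y, N):
--     return q_x == x or q_y == y or abs(q_x - x) == abs(q_y - y)
-- ===== Notes on version B (the rewrite author's own statement) =====
-- stated objective: faster
-- what changed: Replaced the O(N) scan over range(-N, N) with the closed-form O(1) diagonal test abs(q_x-x) == abs(q_y-y) alongside the row/column checks.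
-- intended difference: On inputs off the board where the queens share a diagonal but the offset q_y-y lies outside [-N, N-1] (dx,dy nonzero, |dx|=|dy|), A's bounded loop misses the diagonal and returns False, while B returns True, which is the intended geometric meaning of 'attackable'. — e.g. on attackable(3, 3, 0, 0, 2): A returns false, B returns true
import Mathlib
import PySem

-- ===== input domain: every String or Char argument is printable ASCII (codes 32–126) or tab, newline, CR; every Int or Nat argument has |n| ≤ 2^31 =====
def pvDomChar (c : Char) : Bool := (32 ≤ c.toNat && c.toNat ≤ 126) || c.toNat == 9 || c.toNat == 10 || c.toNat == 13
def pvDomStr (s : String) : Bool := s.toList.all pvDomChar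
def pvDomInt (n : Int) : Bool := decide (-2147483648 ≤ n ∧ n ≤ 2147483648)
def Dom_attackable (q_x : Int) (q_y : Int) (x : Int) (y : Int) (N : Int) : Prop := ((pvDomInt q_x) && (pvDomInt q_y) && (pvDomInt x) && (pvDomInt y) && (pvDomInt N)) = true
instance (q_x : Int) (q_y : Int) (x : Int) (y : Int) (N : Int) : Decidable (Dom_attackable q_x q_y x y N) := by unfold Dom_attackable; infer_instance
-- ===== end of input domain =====

-- B replaces A's O(N) scan over range(-N, N) with the closed-form O(1) diagonal
-- test |q_x-x| == |q_y-y| (objective: faster, asymptotic).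

-- ===== PORT A =====
-- the 'for k in range(-N, N)' loop with its two early-return branches
def attackableLoop (q_x : Int) (q_y : Int) (x : Int) (y : Int) : List Int → Bool
  | [] => false
  | k :: ks =>
    if x + k = q_x ∧ y + k = q_y then true
    else if x - k = q_x ∧ y + k = q_y then true
    else attackableLoop q_x q_y x y ks

def attackable (q_x : Int) (q_y : Int) (x : Int) (y : Int) (N : Int) : Bool :=
  if q_x = x then true
  else if q_y = y then true
  else attackableLoop q_x q_y x y (PySem.List.pyRange (-N) N 1)

-- ===== PORT B =====
def attackable_alt (q_x : Int) (q_y : Int) (x : Int) (y : Int) (N : Int) : Bool :=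
  q_x == x || q_y == y || (q_x - x).natAbs == (q_y - y).natAbs

-- ===== PRECONDITION & SPEC =====
-- On inputs off the board where the queens share a diagonal but the offset q_y-y lies
-- outside [-N, N-1] (dx, dy nonzero, |dx| = |dy|), A's bounded loop misses the diagonal
-- and returns False, while B returns True — the intended geometric meaning of 'attackable'.
def D_attackable (q_x : Int) (q_y : Int) (x : Int) (y : Int) (N : Int) : Prop :=
  q_x ≠ x ∧ q_y ≠ y ∧ (q_x - x = q_y - y ∨ q_x - x = -(q_y - y)) ∧ (q_y - y < -N ∨ N ≤ q_y - y)
instance (q_x : Int) (q_y : Int) (x : Int) (y : Int) (N : Int) : Decidable (D_attackable q_x q_y x y N) := by unfold D_attackable; infer_instance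

def Spec_attackable (q_x : Int) (q_y : Int) (x : Int) (y : Int) (N : Int) (out : Bool) : Prop := ¬ D_attackable q_x q_y x y N → out = attackable_alt q_x q_y x y N
instance (q_x : Int) (q_y : Int) (x : Int) (y : Int) (N : Int) (out : Bool) : Decidable (Spec_attackable q_x q_y x y N out) := by unfold Spec_attackable; infer_instance

def pvDiffWitness_attackable : Int × Int × Int × Int × Int := (3, 3, 0, 0, 2)
def pvDiffWitnessOut_attackable : Bool × Bool := (false, true)

-- ===== CLAIM (what is proved, stated in full; the proofs are below) =====
def Claim_unchanged_attackable : Prop := ∀ (q_x : Int) (q_y : Int) (x : Int) (y : Int) (N : Int), Dom_attackable q_x q_y x y N → Spec_attackable q_x q_y x y N (attackable q_x q_y x y N)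
def Claim_changed_attackable : Prop := Dom_attackable (pvDiffWitness_attackable.1) (pvDiffWitness_attackable.2.1) (pvDiffWitness_attackable.2.2.1) (pvDiffWitness_attackable.2.2.2.1) (pvDiffWitness_attackable.2.2.2.2) ∧ D_attackable (pvDiffWitness_attackable.1) (pvDiffWitness_attackable.2.1) (pvDiffWitness_attackable.2.2.1) (pvDiffWitness_attackable.2.2.2.1) (pvDiffWitness_attackable.2.2.2.2) ∧ attackable (pvDiffWitness_attackable.1) (pvDiffWitness_attackable.2.1) (pvDiffWitness_attackable.2.2.1) (pvDiffWitness_attackable.2.2.2.1) (pvDiffWitness_attackable.2.2.2.2) = pvDiffWitnessOut_attackable.1 ∧ attackable_alt (pvDiffWitness_attackable.1) (pvDiffWitness_attackable.2.1) (pvDiffWitness_attackable.2.2.1) (pvDiffWitness_attackable.2.2.2.1) (pvDiffWitness_attackable.2.2.2.2) = pvDiffWitnessOut_attackable.2 ∧ pvDiffWitnessOut_attackable.1 ≠ pvDiffWitnessOut_attackable.2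
def Claim_exact_attackable : Prop := ∀ (q_x : Int) (q_y : Int) (x : Int) (y : Int) (N : Int), Dom_attackable q_x q_y x y N → D_attackable q_x q_y x y N → attackable q_x q_y x y N ≠ attackable_alt q_x q_y x y N

-- ===== LEMMAS AND PROOFS =====
-- the loop returns true iff some k in the list satisfies one of the two branch tests
theorem attackableLoop_eq_any (q_x q_y x y : Int) (ks : List Int) :
    attackableLoop q_x q_y x y ks
      = ks.any (fun k => decide ((x + k = q_x ∧ y + k = q_y) ∨ (x - k = q_x ∧ y + k = q_y))) := by
  induction ks with
  | nil => rfl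
  | cons k ks ih =>
    simp only [attackableLoop, List.any_cons, ih]
    by_cases h1 : x + k = q_x ∧ y + k = q_y
    · simp [h1]
    · by_cases h2 : x - k = q_x ∧ y + k = q_y
      · simp [h2]
      · simp [h2]

-- closed-form characterisation of A
theorem attackable_eq (q_x q_y x y N : Int) :
    attackable q_x q_y x y N = true ↔
      q_x = x ∨ q_y = y ∨
        ((q_x - x = q_y - y ∨ q_x - x = -(q_y - y)) ∧ -N ≤ q_y - y ∧ q_y - y < N) := by
  unfold attackable
  by_cases hx : q_x = x
  · simp [hx]
  · by_cases hy : q_y = y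
    · simp [hx, hy]
    · simp only [hx, hy, if_false, attackableLoop_eq_any, List.any_eq_true,
        PySem.List.mem_pyRange_one, decide_eq_true_eq]
      constructor
      · rintro ⟨k, ⟨hk1, hk2⟩, h⟩
        refine Or.inr (Or.inr ?_)
        rcases h with ⟨ha, hb⟩ | ⟨ha, hb⟩ <;> constructor <;> omega
      · rintro (h | h | ⟨hd, hlo, hhi⟩)
        · exact h.elim
        · exact h.elim
        · refine ⟨q_y - y, ⟨by omega, by omega⟩, ?_⟩
          rcases hd with h | h
          · exact Or.inl ⟨by omega, by omega⟩
          · exact Or.inr ⟨by omega, by omega⟩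

theorem attackable_alt_eq (q_x q_y x y N : Int) :
    attackable_alt q_x q_y x y N = true ↔
      q_x = x ∨ q_y = y ∨ (q_x - x = q_y - y ∨ q_x - x = -(q_y - y)) := by
  simp only [attackable_alt, Bool.or_eq_true, beq_iff_eq, Int.natAbs_eq_natAbs_iff]
  constructor
  · rintro ((h | h) | h)
    · exact Or.inl h
    · exact Or.inr (Or.inl h)
    · exact Or.inr (Or.inr (by omega))
  · rintro (h | h | h)
    · exact Or.inl (Or.inl h)
    · exact Or.inl (Or.inr h)
    · exact Or.inr (by omega)

-- ===== VERDICT (by name: the statement is the Claim_ definition above) =====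
theorem attackable_spec : Claim_unchanged_attackable := by
  intro q_x q_y x y N _ hD
  unfold D_attackable at hD
  rw [Bool.eq_iff_iff, attackable_eq, attackable_alt_eq]
  constructor
  · rintro (h | h | ⟨hd, _, _⟩)
    · exact Or.inl h
    · exact Or.inr (Or.inl h)
    · exact Or.inr (Or.inr hd)
  · rintro (h | h | hd)
    · exact Or.inl h
    · exact Or.inr (Or.inl h)
    · by_cases hx : q_x = x
      · exact Or.inl hx
      · by_cases hy : q_y = y
        · exact Or.inr (Or.inl hy)
        · refine Or.inr (Or.inr ⟨hd, ?_, ?_⟩) <;>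
            · by_contra hc
              exact hD ⟨hx, hy, hd, by omega⟩

theorem attackable_changed : Claim_changed_attackable := by unfold Claim_changed_attackable; decide

theorem attackable_tight : Claim_exact_attackable := by
  intro q_x q_y x y N _ hD
  unfold D_attackable at hD
  intro heq
  have hB : attackable_alt q_x q_y x y N = true :=
    (attackable_alt_eq q_x q_y x y N).mpr (Or.inr (Or.inr hD.2.2.1))
  have hA : attackable q_x q_y x y N = true := heq.trans hB
  rcases (attackable_eq q_x q_y x y N).mp hA with h | h | ⟨_, hlo, hhi⟩
  · exact hD.1 h
  · exact hD.2.1 h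
  · rcases hD.2.2.2 with h | h <;> omega
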